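-- pv_equiv track=rewrite | github.com/didevlab/service-checker | app/modules/oci/monitor.py | _filter_incidents
-- ===== SOURCE A (Python) =====
-- from typing import Dict, List, Optional
--
-- def _filter_incidents(incidents: List[Dict], targets: List[str]) -> List[Dict]:
--     if not targets:
--         return incidents
--
--     target_set = {target.lower() for target in targets}
--     filtered = []
--     for incident in incidents:
--         haystack = " ".join(
--             [
--                 incident.get("title", ""),
--                 incident.get("region", ""),
--                 incident.get("service", ""),
--             ]
--         ).lower()
--         if any(target in haystack for target in target_set):
--             filtered.append(incident)
--     return filtered
-- ===== SOURCE B (Python) =====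
-- def _filter_incidents(incidents, targets):
--     # Inverted loop nesting: one pass over incidents per distinct lowered target,
--     # collecting the set of matching indices (stopping once everything matched),
--     # then emit the matched incidents in original order.
--     if not targets:
--         return incidents
--
--     haystacks = [
--         " ".join(
--             [
--                 incident.get("title", ""),
--                 incident.get("region", ""),
--                 incident.get("service", ""),
--             ]
--         ).lower()
--         for incident in incidents
--     ]
--     needles = {target.lower() for target in targets}
--     matched = set()
--     for needle in needles:
--         if len(matched) == len(haystacks):
--             break
--         for i, hay in enumerate(haystacks):
--             if needle in hay:
--                 matched.add(i)
--     return [incident for i, incident in enumerate(incidents) if i in matched]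
-- ===== Notes on version B (the rewrite author's own statement) =====
-- stated objective: alternative
-- what changed: B inverts the loop nesting: it precomputes all lowercased haystacks once, then scans the incident list once per distinct lowered target collecting a set of matching indices (stopping early once every incident is matched), and finally emits the matched incidents in original order, instead of testing every lowered target inside the per-incident loop.
import Mathlib
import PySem

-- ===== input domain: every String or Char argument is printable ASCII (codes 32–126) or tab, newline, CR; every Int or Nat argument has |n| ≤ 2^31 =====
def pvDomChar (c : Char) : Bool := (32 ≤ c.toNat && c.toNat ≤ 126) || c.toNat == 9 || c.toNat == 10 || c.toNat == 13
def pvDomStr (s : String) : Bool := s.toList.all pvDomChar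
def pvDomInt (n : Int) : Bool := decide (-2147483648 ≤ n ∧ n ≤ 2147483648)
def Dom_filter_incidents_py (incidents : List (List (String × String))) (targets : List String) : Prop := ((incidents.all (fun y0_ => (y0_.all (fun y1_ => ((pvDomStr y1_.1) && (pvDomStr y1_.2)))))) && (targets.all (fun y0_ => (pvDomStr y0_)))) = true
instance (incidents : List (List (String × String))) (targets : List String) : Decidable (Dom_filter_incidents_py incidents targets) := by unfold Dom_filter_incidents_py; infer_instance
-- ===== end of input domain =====

-- B inverts the loop nesting: per distinct lowered target it scans the precomputed
-- haystacks collecting a set of matching indices (stopping once every incident is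
-- matched), then emits matches in original order; objective: alternative.

-- ===== PORT A =====
-- haystack as both Pythons build it: " ".join(get title/region/service).lower()
def pvHay (incident : List (String × String)) : String :=
  PySem.Str.lower (PySem.Str.join " "
    [ (PySem.Dict.mk incident).getD "title" ""
    , (PySem.Dict.mk incident).getD "region" ""
    , (PySem.Dict.mk incident).getD "service" "" ])

def filter_incidents_py (incidents : List (List (String × String))) (targets : List String) : List (List (String × String)) :=
  if targets = [] then incidents
  else
    let target_set : PySem.Set String := PySem.Set.ofList (targets.map PySem.Str.lower)
    incidents.foldl
      (fun filtered incident =>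
        let haystack := pvHay incident
        if target_set.any (fun target => PySem.Str.isIn target haystack) then filtered ++ [incident]
        else filtered)
      []

-- ===== PORT B =====
def filter_incidents_py_alt (incidents : List (List (String × String))) (targets : List String) : List (List (String × String)) :=
  if targets = [] then incidents
  else
    let haystacks := incidents.map pvHay
    let needles : PySem.Set String := PySem.Set.ofList (targets.map PySem.Str.lower)
    let matched : PySem.Set Int :=
      needles.foldl
        (fun matched needle =>
          if PySem.Set.len matched == (haystacks.length : Int) then matched  -- 'break': every incident already matched
          else
            (PySem.List.enumerate haystacks 0).foldl
              (fun matched p => if PySem.Str.isIn needle p.2 then PySem.Set.add matched p.1 else matched)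
              matched)
        PySem.Set.empty
    ((PySem.List.enumerate incidents 0).filter (fun p => PySem.Set.contains matched p.1)).map (·.2)

-- ===== PRECONDITION & SPEC =====
def Spec_filter_incidents_py (incidents : List (List (String × String))) (targets : List String) (out : List (List (String × String))) : Prop := out = filter_incidents_py_alt incidents targets
instance (incidents : List (List (String × String))) (targets : List String) (out : List (List (String × String))) : Decidable (Spec_filter_incidents_py incidents targets out) := by unfold Spec_filter_incidents_py; infer_instance

-- ===== CLAIM (what is proved, stated in full; the proofs are below) =====
def Claim_equal_filter_incidents_py : Prop := ∀ (incidents : List (List (String × String))) (targets : List String), Dom_filter_incidents_py incidents targets → Spec_filter_incidents_py incidents targets (filter_incidents_py incidents targets)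

-- ===== LEMMAS AND PROOFS =====

-- the common match predicate both programs decide for each incident
def pvMatch (targets : List String) (incident : List (String × String)) : Bool :=
  targets.any (fun target => PySem.Str.isIn (PySem.Str.lower target) (pvHay incident))

-- A's any over the deduplicated lowered-target set equals pvMatch
theorem pv_any_set (targets : List String) (incident : List (String × String)) :
    (PySem.Set.ofList (targets.map PySem.Str.lower)).any
      (fun target => PySem.Str.isIn target (pvHay incident)) = pvMatch targets incident := by
  rw [Bool.eq_iff_iff]
  simp only [pvMatch, List.any_eq_true]
  constructor
  · rintro ⟨t, ht, hin⟩
    rw [PySem.Set.mem_ofList] at ht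
    obtain ⟨u, hu, rfl⟩ := List.mem_map.1 ht
    exact ⟨u, hu, hin⟩
  · rintro ⟨u, hu, hin⟩
    exact ⟨PySem.Str.lower u, (PySem.Set.mem_ofList ..).2 (List.mem_map_of_mem hu), hin⟩

-- membership after the inner fold of B (adding indices of matching entries)
theorem pv_mem_inner {α : Type} (l : List (Int × α)) (c : Int × α → Bool) (s : PySem.Set Int) (x : Int) :
    x ∈ l.foldl (fun m p => if c p then PySem.Set.add m p.1 else m) s ↔
      x ∈ s ∨ ∃ p ∈ l, c p = true ∧ x = p.1 := by
  induction l generalizing s with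
  | nil => simp
  | cons p l ih =>
    simp only [List.foldl_cons]
    by_cases hc : c p = true
    · rw [hc, if_pos rfl, ih]
      simp only [PySem.Set.mem_add, List.mem_cons]
      constructor
      · rintro (⟨h | h⟩ | ⟨q, hq, hcq, rfl⟩)
        · exact Or.inl h
        · exact Or.inr ⟨p, Or.inl rfl, hc, h⟩
        · exact Or.inr ⟨q, Or.inr hq, hcq, rfl⟩
      · rintro (h | ⟨q, hq | hq, hcq, rfl⟩)
        · exact Or.inl (Or.inl h)
        · exact Or.inl (Or.inr (by rw [hq]))
        · exact Or.inr ⟨q, hq, hcq, rfl⟩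
    · rw [if_neg hc, ih]
      simp only [List.mem_cons]
      constructor
      · rintro (h | ⟨q, hq, hcq, rfl⟩)
        · exact Or.inl h
        · exact Or.inr ⟨q, Or.inr hq, hcq, rfl⟩
      · rintro (h | ⟨q, hq | hq, hcq, rfl⟩)
        · exact Or.inl h
        · exact absurd hcq (by rw [hq]; exact hc)
        · exact Or.inr ⟨q, hq, hcq, rfl⟩

-- the inner fold only adds elements, keeping the set duplicate-free
theorem pv_nodup_inner {α : Type} (l : List (Int × α)) (c : Int × α → Bool) :
    ∀ (s : PySem.Set Int), s.Nodup →
    (l.foldl (fun m p => if c p then PySem.Set.add m p.1 else m) s).Nodup := by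
  induction l with
  | nil => intro s hs; exact hs
  | cons p l ih =>
    intro s hs
    simp only [List.foldl_cons]
    by_cases hc : c p = true
    · rw [hc, if_pos rfl]; exact ih _ (PySem.Set.nodup_add _ _ hs)
    · rw [if_neg hc]; exact ih _ hs

-- membership after B's outer fold over the needles, with the 'break' guard:
-- once the matched set has full size it already contains every index, so
-- skipped iterations cannot change membership
theorem pv_mem_outer_break {α : Type} (l : List (Int × α)) (N : Int) (hN : N = (l.length : Int))
    (c : String → Int × α → Bool) (needles : List String) :
    ∀ (s : PySem.Set Int), s.Nodup → (∀ y ∈ s, y ∈ l.map (·.1)) → ∀ (x : Int),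
    (x ∈ needles.foldl
        (fun m t => if PySem.Set.len m == N then m
          else l.foldl (fun m p => if c t p then PySem.Set.add m p.1 else m) m) s ↔
      x ∈ s ∨ ∃ t ∈ needles, ∃ p ∈ l, c t p = true ∧ x = p.1) := by
  induction needles with
  | nil => intro s _ _ x; simp
  | cons t ts ih =>
    intro s hs hsub x
    simp only [List.foldl_cons]
    by_cases hg : (PySem.Set.len s == N) = true
    · rw [if_pos hg, ih s hs hsub x]
      have hperm : s.Perm (l.map (·.1)) := by
        have hlen : (l.map (·.1)).length ≤ s.length := by
          have hg' := beq_iff_eq.1 hg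
          simp only [PySem.Set.len, hN] at hg'
          simp only [List.length_map]
          omega
        exact (hs.subperm hsub).perm_of_length_le hlen
      simp only [List.mem_cons]
      constructor
      · rintro (h | ⟨u, hu, p, hp, hcp, rfl⟩)
        · exact Or.inl h
        · exact Or.inr ⟨u, Or.inr hu, p, hp, hcp, rfl⟩
      · rintro (h | ⟨u, rfl | hu, p, hp, hcp, rfl⟩)
        · exact Or.inl h
        · exact Or.inl (hperm.mem_iff.2 (List.mem_map_of_mem hp))
        · exact Or.inr ⟨u, hu, p, hp, hcp, rfl⟩
    · rw [if_neg hg]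
      have hs' := pv_nodup_inner l (c t) s hs
      have hsub' : ∀ y ∈ l.foldl (fun m p => if c t p then PySem.Set.add m p.1 else m) s,
          y ∈ l.map (·.1) := by
        intro y hy
        rcases (pv_mem_inner l (c t) s y).1 hy with h | ⟨p, hp, _, rfl⟩
        · exact hsub y h
        · exact List.mem_map_of_mem hp
      rw [ih _ hs' hsub' x, pv_mem_inner]
      simp only [List.mem_cons]
      constructor
      · rintro (⟨h | ⟨p, hp, hcp, rfl⟩⟩ | ⟨u, hu, p, hp, hcp, rfl⟩)
        · exact Or.inl h
        · exact Or.inr ⟨t, Or.inl rfl, p, hp, hcp, rfl⟩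
        · exact Or.inr ⟨u, Or.inr hu, p, hp, hcp, rfl⟩
      · rintro (h | ⟨u, rfl | hu, p, hp, hcp, rfl⟩)
        · exact Or.inl (Or.inl h)
        · exact Or.inl (Or.inr ⟨p, hp, hcp, rfl⟩)
        · exact Or.inr ⟨u, hu, p, hp, hcp, rfl⟩

-- filtering an enumeration by an index condition that agrees with q on the entries
theorem pv_filter_enumerate {α : Type} (l : List α) (c : Int → Bool) (q : α → Bool) :
    ∀ (s : Int), (∀ p ∈ PySem.List.enumerate l s, c p.1 = q p.2) →
    ((PySem.List.enumerate l s).filter (fun p => c p.1)).map (·.2) = l.filter q := by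
  induction l with
  | nil => intro s _; simp [PySem.List.enumerate]
  | cons x l ih =>
    intro s h
    rw [PySem.List.enumerate_cons]
    have hx : c s = q x := h (s, x) (by rw [PySem.List.enumerate_cons]; exact List.mem_cons_self ..)
    have ht := ih (s + 1) (fun p hp => h p (by rw [PySem.List.enumerate_cons]; exact List.mem_cons_of_mem _ hp))
    by_cases hq : q x = true
    · rw [List.filter_cons_of_pos (by simpa [hq] using hx), List.map_cons, ht,
        List.filter_cons_of_pos hq]
    · rw [List.filter_cons_of_neg (by simpa [hq] using hx), ht,
        List.filter_cons_of_neg (by simpa using hq)]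

-- ===== VERDICT (by name: the statement is the Claim_ definition above) =====
theorem filter_incidents_py_spec : Claim_equal_filter_incidents_py := by
  intro incidents targets _
  show filter_incidents_py incidents targets = filter_incidents_py_alt incidents targets
  unfold filter_incidents_py filter_incidents_py_alt
  by_cases ht : targets = []
  · simp [ht]
  · rw [if_neg ht, if_neg ht]
    -- A-side: the append-if fold is a filter, and the set-any is pvMatch
    have hA : incidents.foldl
        (fun filtered incident =>
          let haystack := pvHay incident
          if (PySem.Set.ofList (targets.map PySem.Str.lower)).any
              (fun target => PySem.Str.isIn target haystack) then filtered ++ [incident]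
          else filtered) [] = incidents.filter (pvMatch targets) := by
      rw [PySem.List.foldl_append_if_eq_filter]
      simp only [List.nil_append]
      exact List.filter_congr (fun inc _ => pv_any_set targets inc)
    rw [hA]
    -- B-side
    refine Eq.symm ?_
    apply pv_filter_enumerate
    intro p hp
    obtain ⟨k, hk, rfl⟩ := (PySem.List.mem_enumerate_iff ..).1 hp
    rw [Bool.eq_iff_iff, PySem.Set.contains_iff,
      pv_mem_outer_break (PySem.List.enumerate (incidents.map pvHay) 0)
        ((incidents.map pvHay).length : Int)
        (by rw [PySem.List.length_enumerate]) _ _ PySem.Set.empty List.nodup_nil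
        (fun y hy => absurd hy (List.not_mem_nil))]
    simp only [PySem.Set.empty, List.not_mem_nil, false_or]
    constructor
    · rintro ⟨t, htmem, p, hpmem, hcp, heq⟩
      obtain ⟨j, hj, rfl⟩ := (PySem.List.mem_enumerate_iff ..).1 hpmem
      simp only [zero_add, Int.natCast_inj] at heq
      subst heq
      simp only [List.getElem_map] at hcp
      obtain ⟨u, hu, rfl⟩ := List.mem_map.1 ((PySem.Set.mem_ofList ..).1 htmem)
      exact (List.any_eq_true).2 ⟨u, hu, hcp⟩
    · intro hq
      obtain ⟨u, humem, hin⟩ := (List.any_eq_true).1 hq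
      have hk' : k < (incidents.map pvHay).length := by simpa using hk
      exact ⟨PySem.Str.lower u, (PySem.Set.mem_ofList ..).2 (List.mem_map_of_mem humem),
        (0 + (k : Int), (incidents.map pvHay)[k]),
        (PySem.List.mem_enumerate_iff ..).2 ⟨k, hk', rfl⟩,
        by simpa using hin, rfl⟩
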